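-- pv_equiv track=rewrite | github.com/Aluriak/human | poc.py | fragmented_by
-- ===== SOURCE A (Python) =====
-- def fragmented_by(found:set, all_values:tuple) -> [(tuple)]:
--     """Yield sublists of all_values containing only found elements
--
--     >>> tuple(fragmented_by('ABDE', 'ABCDEF'))
--     (('A', 'B'), ('D', 'E'))
--
--     """
--     current_set = []
--     for val in all_values:
--         if val in found:
--             current_set.append(val)
--         else:
--             if current_set:
--                 yield current_set
--             current_set = []
--     if current_set:
--         yield current_set
-- ===== SOURCE B (Python) =====
-- def fragmented_by(found, all_values):
--     vals = list(all_values)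
--     i, n = 0, len(vals)
--     while i < n:
--         k = vals[i] in found
--         j = i + 1
--         while j < n and (vals[j] in found) == k:
--             j += 1
--         if k:
--             yield vals[i:j]
--         i = j
-- ===== Notes on version B (the rewrite author's own statement) =====
-- stated objective: alternative
-- what changed: B scans maximal same-membership runs with a two-pointer span (group-then-filter), yielding each slice directly; A's element-by-element accumulator with an end-of-loop flush disappears.
import Mathlib
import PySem

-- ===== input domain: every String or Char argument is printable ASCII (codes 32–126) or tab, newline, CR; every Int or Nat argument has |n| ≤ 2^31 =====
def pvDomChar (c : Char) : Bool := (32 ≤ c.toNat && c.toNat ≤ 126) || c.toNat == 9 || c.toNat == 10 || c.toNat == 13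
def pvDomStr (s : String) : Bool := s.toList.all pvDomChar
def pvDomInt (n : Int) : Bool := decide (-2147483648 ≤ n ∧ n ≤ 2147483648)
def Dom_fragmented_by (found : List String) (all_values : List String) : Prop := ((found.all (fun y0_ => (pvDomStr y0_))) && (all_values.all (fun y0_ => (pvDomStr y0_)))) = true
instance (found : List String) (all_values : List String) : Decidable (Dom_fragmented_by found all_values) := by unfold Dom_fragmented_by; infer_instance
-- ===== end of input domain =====

-- B scans maximal same-membership runs with a two-pointer span instead of A's element-by-element accumulator with an end-of-loop flush; alternative decomposition, same cost.


-- ===== PORT A =====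
-- A's loop body: state = (sublists yielded so far, current_set); flush current_set at each non-member
def fbStepA (found : List String) (s : List (List String) × List String) (val : String) :
    List (List String) × List String :=
  if found.contains val then (s.1, s.2 ++ [val])
  else if s.2 ≠ [] then (s.1 ++ [s.2], []) else (s.1, [])

def fragmented_by (found : List String) (all_values : List String) : List (List String) :=
  let s := all_values.foldl (fbStepA found) ([], [])
  if s.2 ≠ [] then s.1 ++ [s.2] else s.1

-- ===== PORT B =====
-- two-pointer span: the head's membership k, the maximal run of equal membership (take/drop), yield the slice when k, continue after it
def fragmented_by_alt (found : List String) (all_values : List String) : List (List String) :=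
  match all_values with
  | [] => []
  | x :: xs =>
    let k := found.contains x
    if k then
      (x :: xs.takeWhile (fun y => found.contains y == k)) ::
        fragmented_by_alt found (xs.dropWhile (fun y => found.contains y == k))
    else
      fragmented_by_alt found (xs.dropWhile (fun y => found.contains y == k))
termination_by all_values.length
decreasing_by all_goals
  exact Nat.lt_succ_of_le (List.length_dropWhile_le _ _)

-- ===== PRECONDITION & SPEC =====
def Spec_fragmented_by (found : List String) (all_values : List String) (out : List (List String)) : Prop := out = fragmented_by_alt found all_values
instance (found : List String) (all_values : List String) (out : List (List String)) : Decidable (Spec_fragmented_by found all_values out) := by unfold Spec_fragmented_by; infer_instance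

-- ===== CLAIM (what is proved, stated in full; the proofs are below) =====
def Claim_equal_fragmented_by : Prop := ∀ (found : List String) (all_values : List String), Dom_fragmented_by found all_values → Spec_fragmented_by found all_values (fragmented_by found all_values)

-- ===== LEMMAS AND PROOFS =====

-- reference recursion both ports are reduced to: process the list carrying the pending run `cur`
def fbGo (found : List String) : List String → List String → List (List String)
  | [], cur => if cur = [] then [] else [cur]
  | v :: vs, cur =>
    if found.contains v then fbGo found vs (cur ++ [v])
    else (if cur = [] then [] else [cur]) ++ fbGo found vs []

theorem fragA_go (found : List String) (l : List String) :
    ∀ (out : List (List String)) (cur : List String),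
    (let s := l.foldl (fbStepA found) (out, cur)
     if s.2 ≠ [] then s.1 ++ [s.2] else s.1) = out ++ fbGo found l cur := by
  induction l with
  | nil =>
    intro out cur
    simp only [List.foldl_nil, fbGo]
    split_ifs with h <;> simp_all
  | cons v vs ih =>
    intro out cur
    simp only [List.foldl_cons]
    by_cases hv : found.contains v
    · have hs : fbStepA found (out, cur) v = (out, cur ++ [v]) := by
        unfold fbStepA; rw [if_pos hv]
      rw [hs]
      simp only [fbGo, hv, if_true]
      exact ih out (cur ++ [v])
    · by_cases hc : cur = []
      · have hs : fbStepA found (out, cur) v = (out, []) := by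
          unfold fbStepA; rw [if_neg hv, if_neg (by simp [hc])]
        rw [hs]
        simp only [fbGo, hv, Bool.false_eq_true, if_false, hc, if_true, List.nil_append]
        exact ih out []
      · have hs : fbStepA found (out, cur) v = (out ++ [cur], []) := by
          unfold fbStepA; rw [if_neg hv, if_pos hc]
        rw [hs, ih (out ++ [cur]) []]
        have hv' : v ∉ found := by simpa using hv
        simp [fbGo, hv', hc]

-- with a nonempty pending run, fbGo emits `cur` extended by the maximal member prefix, then continues after it
theorem fbGo_span (found : List String) (vs : List String) :
    ∀ cur : List String, cur ≠ [] →
    fbGo found vs cur =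
      (cur ++ vs.takeWhile (fun y => found.contains y)) ::
        fbGo found (vs.dropWhile (fun y => found.contains y)) [] := by
  induction vs with
  | nil => intro cur hc; simp [fbGo, hc]
  | cons v vs ih =>
    intro cur hc
    by_cases hv : v ∈ found
    · simp only [fbGo, List.contains_eq_mem, hv, decide_true, if_true, List.takeWhile_cons,
        List.dropWhile_cons]
      rw [ih (cur ++ [v]) (by simp)]
      simp
    · simp [fbGo, hv, hc]

-- skipping a maximal non-member prefix does not change fbGo with an empty pending run
theorem fbGo_drop (found : List String) (vs : List String) :
    fbGo found (vs.dropWhile (fun y => !found.contains y)) [] = fbGo found vs [] := by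
  induction vs with
  | nil => rfl
  | cons v vs ih =>
    by_cases hv : v ∈ found
    · simp [hv]
    · rw [List.dropWhile_cons, if_pos (by simp [hv]), ih]
      simp [fbGo, hv]

theorem fragB_go (found : List String) (l : List String) :
    fragmented_by_alt found l = fbGo found l [] := by
  fun_induction fragmented_by_alt found l
  case case1 => rfl
  case case2 x xs k h ih =>
    simp only [h] at ih ⊢
    rw [ih]
    have hx : found.contains x = true := h
    simp only [fbGo, hx, if_true, List.nil_append]
    rw [fbGo_span found xs [x] (by simp)]
    simp
  case case3 x xs k h ih =>
    simp only [h] at ih ⊢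
    rw [ih]
    have hx : ¬ found.contains x = true := h
    simp only [fbGo, hx, Bool.false_eq_true, if_false, if_true, List.nil_append]
    have := fbGo_drop found xs
    simpa using this

-- ===== VERDICT (by name: the statement is the Claim_ definition above) =====
theorem fragmented_by_spec : Claim_equal_fragmented_by := by
  intro found all_values _
  unfold Spec_fragmented_by
  rw [fragB_go]
  have := fragA_go found all_values [] []
  unfold fragmented_by
  simpa using this
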